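-- pv_equiv track=rewrite | github.com/grey920/python-algorythm | w1/day5_1652_2.py | count_vertical_spaces
-- ===== SOURCE A (Python) =====
-- def count_vertical_spaces(room, size):
--     col_space_count = 0
--     for j in range(size):
--         space = 0
--         for i in range(size):
--             if room[i][j] == 'X':
--                 if space >= 2:
--                     col_space_count += 1
--                 space = 0
--             else:
--                 space += 1
--
--         # 마지막 행 처리
--         if space >= 2:
--             col_space_count += 1
--
--     return col_space_count
-- ===== SOURCE B (Python) =====
-- def _runs(col):
--     """Split col into maximal runs of equal (c == 'X') key, as [(key, length)]."""
--     if not col: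
--         return []
--     rest = _runs(col[1:])
--     k = (col[0] == 'X')
--     if rest and rest[0][0] == k:
--         return [(k, rest[0][1] + 1)] + rest[1:]
--     return [(k, 1)] + rest
--
--
-- def count_vertical_spaces(room, size):
--     total = 0
--     for j in range(size):
--         col = [room[i][j] for i in range(size)]
--         for k, n in _runs(col):
--             if not k and n >= 2:
--                 total += 1
--     return total
-- ===== Notes on version B (the rewrite author's own statement) =====
-- stated objective: alternative
-- what changed: Replaces A's running-counter state machine with its separate end-of-column fixup by explicit run segmentation of each column into maximal (is-'X', length) runs followed by a length>=2 filter on the non-'X' runs.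
import Mathlib
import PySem

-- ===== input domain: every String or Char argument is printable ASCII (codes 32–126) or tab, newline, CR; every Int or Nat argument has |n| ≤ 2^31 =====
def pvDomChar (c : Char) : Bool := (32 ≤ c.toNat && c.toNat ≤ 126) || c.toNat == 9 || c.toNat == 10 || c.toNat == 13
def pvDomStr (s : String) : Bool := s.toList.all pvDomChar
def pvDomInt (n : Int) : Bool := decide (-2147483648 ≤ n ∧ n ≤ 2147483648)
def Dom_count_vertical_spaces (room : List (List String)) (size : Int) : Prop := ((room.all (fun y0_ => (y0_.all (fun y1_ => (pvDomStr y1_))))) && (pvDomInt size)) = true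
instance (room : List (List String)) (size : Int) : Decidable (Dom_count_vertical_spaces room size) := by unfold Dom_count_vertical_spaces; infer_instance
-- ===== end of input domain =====

-- B replaces A's running-counter state machine (with end-of-column fixup) by run
-- segmentation of each column plus a length>=2 filter; alternative decomposition, same cost.


-- shared cell accessor: room[i][j] (in range whenever Pre_ holds; the getD defaults are never hit there)
def cvsCell (room : List (List String)) (i j : Int) : String :=
  (PySem.List.pyGet? ((PySem.List.pyGet? room i).getD []) j).getD ""

-- ===== PORT A =====
def count_vertical_spaces (room : List (List String)) (size : Int) : Int :=
  (PySem.List.pyRange 0 size 1).foldl (fun c j =>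
    let st := (PySem.List.pyRange 0 size 1).foldl
      (fun (st : Int × Int) i =>
        if cvsCell room i j == "X" then
          (if st.2 ≥ 2 then st.1 + 1 else st.1, 0)
        else (st.1, st.2 + 1)) (c, 0)
    if st.2 ≥ 2 then st.1 + 1 else st.1) 0

-- ===== PORT B =====
-- B's helpers: _push appends one cell's key to a runs list, _runs folds the column
def cvsPush (k : Bool) : List (Bool × Int) → List (Bool × Int)
  | [] => [(k, 1)]
  | (k2, n) :: t => if k == k2 then (k2, n + 1) :: t else (k, 1) :: (k2, n) :: t

def cvsRuns : List String → List (Bool × Int)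
  | [] => []
  | c :: rest => cvsPush (c == "X") (cvsRuns rest)

def count_vertical_spaces_alt (room : List (List String)) (size : Int) : Int :=
  (PySem.List.pyRange 0 size 1).foldl (fun t j =>
    let col := (PySem.List.pyRange 0 size 1).map (fun i => cvsCell room i j)
    (cvsRuns col).foldl (fun t g => if g.1 = false ∧ g.2 ≥ 2 then t + 1 else t) t) 0

-- ===== PRECONDITION & SPEC =====
-- Pre_ excludes exactly the inputs where Python A raises IndexError: it needs rows
-- 0..size-1 to exist and each of those rows to have at least size cells.
def Pre_count_vertical_spaces (room : List (List String)) (size : Int) : Prop :=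
  size ≤ (room.length : Int) ∧ ∀ row ∈ room.take size.toNat, size ≤ (row.length : Int)
instance (room : List (List String)) (size : Int) : Decidable (Pre_count_vertical_spaces room size) := by unfold Pre_count_vertical_spaces; infer_instance

def pvWitness_count_vertical_spaces : List (List String) × Int :=
  ([[" ", " "], [" ", "X"]], 2)

def Spec_count_vertical_spaces (room : List (List String)) (size : Int) (out : Int) : Prop := out = count_vertical_spaces_alt room size
instance (room : List (List String)) (size : Int) (out : Int) : Decidable (Spec_count_vertical_spaces room size out) := by unfold Spec_count_vertical_spaces; infer_instance

-- ===== CLAIM (what is proved, stated in full; the proofs are below) =====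
def Claim_equal_count_vertical_spaces : Prop := ∀ (room : List (List String)) (size : Int), Dom_count_vertical_spaces room size → Pre_count_vertical_spaces room size → Spec_count_vertical_spaces room size (count_vertical_spaces room size)

-- ===== LEMMAS AND PROOFS =====

-- contribution of a trailing blank run of length s
def cvsB (s : Int) : Int := if s ≥ 2 then 1 else 0

-- value of A's state machine (from space s, with final fixup) on a runs list
def cvsCnt : Int → List (Bool × Int) → Int
  | s, [] => cvsB s
  | s, (true, _) :: t => cvsB s + cvsCnt 0 t
  | s, (false, n) :: t => cvsCnt (s + n) t

-- A's inner fold + fixup, computed over the column's runs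
theorem cvsInner_eq : ∀ (col : List String) (c s : Int),
    (let st := col.foldl (fun (st : Int × Int) cell =>
        if cell == "X" then (if st.2 ≥ 2 then st.1 + 1 else st.1, 0)
        else (st.1, st.2 + 1)) (c, s)
     if st.2 ≥ 2 then st.1 + 1 else st.1)
    = c + cvsCnt s (cvsRuns col) := by
  intro col
  induction col with
  | nil =>
    intro c s
    simp only [List.foldl_nil, cvsRuns, cvsCnt, cvsB]
    split <;> ring
  | cons hd tl ih =>
    intro c s
    simp only [List.foldl_cons, cvsRuns]
    cases hX : (hd == "X") with
    | true =>
      rw [if_pos rfl]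
      rw [ih (if s ≥ 2 then c + 1 else c) 0]
      rcases h : cvsRuns tl with _ | ⟨⟨k, n⟩, t⟩
      · norm_num [cvsPush, cvsCnt, cvsB]
        split <;> ring
      · cases k
        · norm_num [cvsPush, cvsCnt, cvsB]
          split <;> ring
        · norm_num [cvsPush, cvsCnt, cvsB]
          split <;> ring
    | false =>
      rw [if_neg Bool.false_ne_true]
      rw [ih c (s + 1)]
      rcases h : cvsRuns tl with _ | ⟨⟨k, n⟩, t⟩
      · norm_num [cvsPush, cvsCnt]
      · cases k
        · norm_num [cvsPush, cvsCnt]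
          rw [show s + (n + 1) = s + 1 + n by ring]
        · norm_num [cvsPush, cvsCnt]

-- keys of adjacent runs differ
def cvsAlt : List (Bool × Int) → Prop
  | [] => True
  | [_] => True
  | a :: b :: t => a.1 ≠ b.1 ∧ cvsAlt (b :: t)

theorem cvsAlt_tail : ∀ (a : Bool × Int) (l : List (Bool × Int)), cvsAlt (a :: l) → cvsAlt l := by
  intro a l h
  cases l with
  | nil => trivial
  | cons b t => exact h.2

theorem cvsAlt_head_swap : ∀ (a b : Bool × Int) (l : List (Bool × Int)), a.1 = b.1 →
    cvsAlt (a :: l) → cvsAlt (b :: l) := by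
  intro a b l hab h
  cases l with
  | nil => trivial
  | cons x t => exact ⟨hab ▸ h.1, h.2⟩

theorem cvsRuns_alt : ∀ (col : List String), cvsAlt (cvsRuns col) := by
  intro col
  induction col with
  | nil => trivial
  | cons hd tl ih =>
    simp only [cvsRuns]
    rcases h : cvsRuns tl with _ | ⟨⟨k, n⟩, t⟩
    · trivial
    · rw [h] at ih
      simp only [cvsPush]
      by_cases hk : ((hd == "X") == k) = true
      · rw [if_pos hk]
        exact cvsAlt_head_swap (k, n) (k, n + 1) t rfl ih
      · rw [if_neg hk]
        exact ⟨by simpa using hk, ih⟩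

-- B's filter-count over an alternating runs list equals the state-machine value
theorem cvsFold_eq : ∀ (runs : List (Bool × Int)), cvsAlt runs →
    ∀ t : Int, runs.foldl (fun t g => if g.1 = false ∧ g.2 ≥ 2 then t + 1 else t) t
      = t + cvsCnt 0 runs := by
  intro runs
  induction runs with
  | nil => intro _ t; norm_num [cvsCnt, cvsB]
  | cons hd tl ih =>
    rcases hd with ⟨k, n⟩
    intro hch t
    have htl := cvsAlt_tail _ _ hch
    simp only [List.foldl_cons]
    rw [ih htl]
    cases k
    · rcases htls : tl with _ | ⟨⟨k2, m⟩, t2⟩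
      · norm_num [cvsCnt, cvsB]
        split <;> ring
      · have hk2 : k2 = true := by
          rw [htls] at hch
          rcases hch with ⟨hne, _⟩
          cases k2
          · exact absurd rfl hne
          · rfl
        subst hk2
        norm_num [cvsCnt, cvsB]
        split <;> ring
    · norm_num [cvsCnt, cvsB]

-- per-column equality folded along any outer index list L (inner list R fixed)
theorem cvsOuter (room : List (List String)) (R : List Int) :
    ∀ (L : List Int) (c : Int),
      L.foldl (fun c j =>
        let st := R.foldl (fun (st : Int × Int) i =>
          if cvsCell room i j == "X" then (if st.2 ≥ 2 then st.1 + 1 else st.1, 0)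
          else (st.1, st.2 + 1)) (c, 0)
        if st.2 ≥ 2 then st.1 + 1 else st.1) c
      = L.foldl (fun t j =>
        let col := R.map (fun i => cvsCell room i j)
        (cvsRuns col).foldl (fun t g => if g.1 = false ∧ g.2 ≥ 2 then t + 1 else t) t) c := by
  intro L
  induction L with
  | nil => intro c; rfl
  | cons j L ih =>
    intro c
    simp only [List.foldl_cons]
    have hA : (let st := R.foldl (fun (st : Int × Int) i =>
          if cvsCell room i j == "X" then (if st.2 ≥ 2 then st.1 + 1 else st.1, 0)
          else (st.1, st.2 + 1)) (c, 0)
        if st.2 ≥ 2 then st.1 + 1 else st.1)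
        = c + cvsCnt 0 (cvsRuns (R.map (fun i => cvsCell room i j))) := by
      have h0 := cvsInner_eq (R.map (fun i => cvsCell room i j)) c 0
      rw [List.foldl_map] at h0
      exact h0
    have hB : (cvsRuns (R.map (fun i => cvsCell room i j))).foldl
        (fun t g => if g.1 = false ∧ g.2 ≥ 2 then t + 1 else t) c
        = c + cvsCnt 0 (cvsRuns (R.map (fun i => cvsCell room i j))) :=
      cvsFold_eq _ (cvsRuns_alt _) c
    rw [hA, ← hB]
    exact ih _

-- ===== VERDICT (by name: the statement is the Claim_ definition above) =====
theorem count_vertical_spaces_spec : Claim_equal_count_vertical_spaces := by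
  unfold Claim_equal_count_vertical_spaces
  intro room size _ _
  unfold Spec_count_vertical_spaces count_vertical_spaces count_vertical_spaces_alt
  exact cvsOuter room (PySem.List.pyRange 0 size 1) (PySem.List.pyRange 0 size 1) 0
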